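-- pv_equiv track=rewrite | github.com/unixnut/cls | colorls/colorls.py | tweak
-- ===== SOURCE A (Python) =====
-- from typing import Dict, Tuple, List, Union, AnyStr, Iterable, Callable, Type, Optional
--
-- def tweak(s: Optional[str], n=0) -> Tuple[int, str]:
--     if not s:
--         return 0, ""
--     else:
--         count, s_prime = tweak(s[1:], n+1)
--         # Odd modulo 3
--         if int(count / 3) % 2 == 1 and s_prime:
--             return count + 1, s[0] + "\b_" + s_prime
--         else:
--             return count + 1, s[0] + s_prime
-- ===== SOURCE B (Python) =====
-- def tweak(s, n=0):
--     if not s: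
--         return 0, ""
--     L = len(s)
--     parts = []
--     for i, ch in enumerate(s):
--         parts.append(ch)
--         if i < L - 1 and ((L - 1 - i) // 3) % 2 == 1:
--             parts.append("\b_")
--     return L, "".join(parts)
-- ===== Notes on version B (the rewrite author's own statement) =====
-- stated objective: faster
-- what changed: Replaced A's tail-first recursion, which rebuilds the suffix string by concatenation at every level (quadratic), by a single left-to-right loop over enumerate(s) that computes each suffix length from the index, appends pieces to a list and joins once.
import Mathlib
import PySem

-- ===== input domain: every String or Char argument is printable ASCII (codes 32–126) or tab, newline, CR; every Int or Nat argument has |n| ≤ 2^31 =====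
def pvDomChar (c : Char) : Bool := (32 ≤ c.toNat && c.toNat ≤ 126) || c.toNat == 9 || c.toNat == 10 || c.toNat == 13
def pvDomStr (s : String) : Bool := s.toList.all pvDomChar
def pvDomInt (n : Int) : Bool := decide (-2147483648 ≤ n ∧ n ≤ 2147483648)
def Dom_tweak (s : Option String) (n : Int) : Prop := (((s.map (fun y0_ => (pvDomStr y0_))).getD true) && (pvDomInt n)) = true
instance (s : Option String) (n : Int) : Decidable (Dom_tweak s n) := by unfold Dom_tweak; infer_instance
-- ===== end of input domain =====

-- B replaces A's quadratic tail recursion (re-concatenating the suffix string at every level)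
-- by a single left-to-right pass that appends pieces to a list and joins once; objective: faster (asymptotic).

-- ===== PORT A =====
-- A's recursion on s[1:]; count is always ≥ 0 here, so Python's int(count/3) equals floor division.
def tweakChars (l : List Char) (n : Int) : Int × List Char :=
  match l with
  | [] => (0, [])
  | c :: rest =>
    let r := tweakChars rest (n + 1)
    if PySem.Int.mod (PySem.Int.floordiv r.1 3) 2 = 1 ∧ r.2 ≠ [] then
      (r.1 + 1, c :: '\x08' :: '_' :: r.2)
    else
      (r.1 + 1, c :: r.2)

def tweak (s : Option String) (n : Int) : Int × String :=
  match s with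
  | none => (0, "")
  | some str =>
    let r := tweakChars str.toList n
    (r.1, String.ofList r.2)

-- ===== PORT B =====
-- the for-loop over enumerate(s), accumulating the parts list
def tweakAltLoop (L : Int) (ps : List (Int × Char)) (parts : List Char) : List Char :=
  match ps with
  | [] => parts
  | (i, ch) :: t =>
    let parts1 := parts ++ [ch]
    let parts2 :=
      if i < L - 1 ∧ PySem.Int.mod (PySem.Int.floordiv (L - 1 - i) 3) 2 = 1 then
        parts1 ++ ['\x08', '_']
      else parts1
    tweakAltLoop L t parts2

def tweak_alt (s : Option String) (_n : Int) : Int × String :=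
  match s with
  | none => (0, "")
  | some str =>
    if str = "" then (0, "")
    else
      let L : Int := str.toList.length
      (L, String.ofList (tweakAltLoop L (PySem.List.enumerate str.toList) []))

-- ===== PRECONDITION & SPEC =====
def Spec_tweak (s : Option String) (n : Int) (out : Int × String) : Prop := out = tweak_alt s n
instance (s : Option String) (n : Int) (out : Int × String) : Decidable (Spec_tweak s n out) := by unfold Spec_tweak; infer_instance

-- ===== CLAIM (what is proved, stated in full; the proofs are below) =====
def Claim_equal_tweak : Prop := ∀ (s : Option String) (n : Int), Dom_tweak s n → Spec_tweak s n (tweak s n)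

-- ===== LEMMAS AND PROOFS =====

theorem tweakChars_fst (l : List Char) (n : Int) : (tweakChars l n).1 = (l.length : Int) := by
  induction l generalizing n with
  | nil => simp [tweakChars]
  | cons c rest ih =>
    simp only [tweakChars]
    split <;> simp [ih]

theorem tweakChars_snd_ne_nil (c : Char) (rest : List Char) (n : Int) :
    (tweakChars (c :: rest) n).2 ≠ [] := by
  simp only [tweakChars]
  split <;> simp

theorem tweakAltLoop_acc (L : Int) (ps : List (Int × Char)) (parts : List Char) :
    tweakAltLoop L ps parts = parts ++ tweakAltLoop L ps [] := by
  induction ps generalizing parts with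
  | nil => simp [tweakAltLoop]
  | cons p t ih =>
    obtain ⟨i, ch⟩ := p
    simp only [tweakAltLoop]
    split
    · rw [ih (parts ++ [ch] ++ ['\x08', '_']), ih ([] ++ [ch] ++ ['\x08', '_'])]
      simp
    · rw [ih (parts ++ [ch]), ih ([] ++ [ch])]
      simp

theorem tweakAltLoop_eq_tweakChars (L : Int) :
    ∀ (l : List Char) (k n : Int), k + (l.length : Int) = L →
      tweakAltLoop L (PySem.List.enumerate l k) [] = (tweakChars l n).2 := by
  intro l
  induction l with
  | nil => intro k n _; simp [tweakAltLoop, tweakChars, PySem.List.enumerate_nil]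
  | cons c rest ih =>
    intro k n hk
    have hlen : L - 1 - k = (rest.length : Int) := by
      simp only [List.length_cons] at hk; push_cast at hk ⊢; omega
    have hlt : k < L - 1 ↔ rest ≠ [] := by
      constructor
      · intro h hnil; subst hnil; simp at hlen; omega
      · intro h
        have : 0 < rest.length := List.length_pos_iff.mpr h
        omega
    rw [PySem.List.enumerate_cons]
    simp only [tweakAltLoop]
    have hIH : tweakAltLoop L (PySem.List.enumerate rest (k + 1)) [] = (tweakChars rest (n + 1)).2 := by
      apply ih
      simp only [List.length_cons] at hk; push_cast at hk ⊢; omega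
    have hsnd : (tweakChars rest (n + 1)).2 ≠ [] ↔ rest ≠ [] := by
      cases rest with
      | nil => simp [tweakChars]
      | cons d t => simp [tweakChars_snd_ne_nil]
    simp only [tweakChars]
    rw [tweakChars_fst rest (n + 1)]
    by_cases hc : PySem.Int.mod (PySem.Int.floordiv ((rest.length : Int)) 3) 2 = 1 ∧ rest ≠ []
    · rw [if_pos (by rw [hlen, hlt]; exact ⟨hc.2, hc.1⟩), if_pos (by exact ⟨hc.1, hsnd.mpr hc.2⟩)]
      rw [tweakAltLoop_acc, hIH]
      simp
    · rw [if_neg (by rw [hlen, hlt]; intro ⟨h1, h2⟩; exact hc ⟨h2, h1⟩),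
        if_neg (by intro ⟨h1, h2⟩; exact hc ⟨h1, hsnd.mp h2⟩)]
      rw [tweakAltLoop_acc, hIH]
      simp

-- ===== VERDICT (by name: the statement is the Claim_ definition above) =====
theorem tweak_spec : Claim_equal_tweak := by
  intro s n _
  unfold Spec_tweak
  match s with
  | none => rfl
  | some str =>
    simp only [tweak, tweak_alt]
    by_cases hstr : str = ""
    · subst hstr
      simp [tweakChars, String.ofList]
      rfl
    · rw [if_neg hstr]
      refine Prod.ext ?_ ?_
      · simpa using tweakChars_fst str.toList n
      · simp only
        congr 1
        exact (tweakAltLoop_eq_tweakChars _ str.toList 0 n (by simp)).symm
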